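-- pv_equiv track=rewrite | github.com/wilmurillo-ai/Design-Assistant | .skills/openclaw-skills/skills/stefan27-4/deeprecall/model_pairs.py | get_sub_agent_model
-- ===== SOURCE A (Python) =====
-- MODEL_PAIRS: dict[str, str] = {
--     # Anthropic
--     "claude-opus-4": "claude-sonnet-4",
--     "claude-opus-4.6": "claude-sonnet-4",
--     "claude-sonnet-4": "claude-haiku-3.5",
--     "claude-sonnet-4.5": "claude-haiku-3.5",
--     "claude-sonnet-3.5": "claude-haiku-3.5",
--     "claude-haiku-3.5": "claude-haiku-3.5",
--     # OpenAI
--     "gpt-4o": "gpt-4o-mini",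
--     "gpt-4": "gpt-4o-mini",
--     "gpt-4-turbo": "gpt-4o-mini",
--     "gpt-4o-mini": "gpt-4o-mini",
--     "gpt-5": "gpt-5-mini",
--     "o3": "gpt-4o-mini",
--     "o3-mini": "gpt-4o-mini",
--     # Google
--     "gemini-2.5-pro": "gemini-2.0-flash",
--     "gemini-2.0-pro": "gemini-2.0-flash",
--     "gemini-2.0-flash": "gemini-2.0-flash-lite",
--     "gemini-1.5-pro": "gemini-1.5-flash",
--     # DeepSeek
--     "deepseek-chat": "deepseek-chat",
--     "deepseek-reasoner": "deepseek-chat",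
--     # Mistral
--     "mistral-large": "mistral-small",
--     "mistral-medium": "mistral-small",
--     # Open-source / local
--     "llama-3.1-70b": "llama-3.1-8b",
--     "llama-3.1-405b": "llama-3.1-70b",
--     "qwen-2.5-72b": "qwen-2.5-7b",
-- }
--
-- def get_sub_agent_model(primary: str) -> str:
--     """Return the cheaper sub-agent model for *primary*.
--
--     Matching strategy:
--
--     1. Strip provider prefix (e.g. ``anthropic/claude-opus-4`` → ``claude-opus-4``)
--     2. Exact match (case-insensitive) against MODEL_PAIRS
--     3. Longest-prefix match (handles version suffixes like ``-20250514``)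
--     4. Fallback: return the bare model name unchanged
--     """
--     if not primary:
--         return primary
--
--     bare = primary.split("/")[-1]
--     lower = bare.lower()
--
--     # Exact match (case-insensitive)
--     for key, value in MODEL_PAIRS.items():
--         if key.lower() == lower:
--             return value
--
--     # Longest-prefix match (case-insensitive)
--     best_key = ""
--     best_value = bare
--     for key, value in MODEL_PAIRS.items():
--         if lower.startswith(key.lower()) and len(key) > len(best_key):
--             best_key = key
--             best_value = value
--
--     return best_value
-- ===== SOURCE B (Python) =====
-- MODEL_PAIRS: dict[str, str] = {
--     "claude-opus-4": "claude-sonnet-4",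
--     "claude-opus-4.6": "claude-sonnet-4",
--     "claude-sonnet-4": "claude-haiku-3.5",
--     "claude-sonnet-4.5": "claude-haiku-3.5",
--     "claude-sonnet-3.5": "claude-haiku-3.5",
--     "claude-haiku-3.5": "claude-haiku-3.5",
--     "gpt-4o": "gpt-4o-mini",
--     "gpt-4": "gpt-4o-mini",
--     "gpt-4-turbo": "gpt-4o-mini",
--     "gpt-4o-mini": "gpt-4o-mini",
--     "gpt-5": "gpt-5-mini",
--     "o3": "gpt-4o-mini",
--     "o3-mini": "gpt-4o-mini",
--     "gemini-2.5-pro": "gemini-2.0-flash",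
--     "gemini-2.0-pro": "gemini-2.0-flash",
--     "gemini-2.0-flash": "gemini-2.0-flash-lite",
--     "gemini-1.5-pro": "gemini-1.5-flash",
--     "deepseek-chat": "deepseek-chat",
--     "deepseek-reasoner": "deepseek-chat",
--     "mistral-large": "mistral-small",
--     "mistral-medium": "mistral-small",
--     "llama-3.1-70b": "llama-3.1-8b",
--     "llama-3.1-405b": "llama-3.1-70b",
--     "qwen-2.5-72b": "qwen-2.5-7b",
-- }
--
-- _MAX_KEY_LEN = max(len(k) for k in MODEL_PAIRS)
--
--
-- def get_sub_agent_model(primary: str) -> str: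
--     """Instead of scanning the table for matching keys, walk the prefixes of the
--     (bare, lowercased) name from longest to shortest and look each one up in the
--     dict directly: the first hit is the longest matching key (keys are lowercase,
--     and an exact match is just the full-length prefix); prefixes longer than the
--     longest key cannot be keys, so start at most there."""
--     if not primary:
--         return primary
--     bare = primary.split("/")[-1]
--     lower = bare.lower()
--     for i in range(min(len(lower), _MAX_KEY_LEN), 0, -1):
--         value = MODEL_PAIRS.get(lower[:i])
--         if value is not None:
--             return value
--     return bare
-- ===== Notes on version B (the rewrite author's own statement) =====
-- stated objective: alternative
-- what changed: Replaces A's two scans over the MODEL_PAIRS table (an exact case-insensitive match loop with early return, then a longest-prefix fold) by direct dict lookups of the prefixes of the lowered bare name from longest to shortest: the first hit is the longest matching key, and an exact match is just the full-length prefix.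
import Mathlib
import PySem

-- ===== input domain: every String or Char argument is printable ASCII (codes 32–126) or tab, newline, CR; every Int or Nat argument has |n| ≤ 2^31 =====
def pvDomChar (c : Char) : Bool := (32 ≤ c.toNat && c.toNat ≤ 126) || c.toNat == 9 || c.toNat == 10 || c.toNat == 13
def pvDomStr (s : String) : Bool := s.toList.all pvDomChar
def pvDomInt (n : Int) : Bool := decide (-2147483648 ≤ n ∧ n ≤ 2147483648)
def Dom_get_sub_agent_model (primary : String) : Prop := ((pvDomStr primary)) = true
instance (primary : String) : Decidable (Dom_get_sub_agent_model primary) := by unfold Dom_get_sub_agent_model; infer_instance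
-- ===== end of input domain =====

-- B replaces A's two scans over the table (exact match, then longest-prefix fold) by direct dict
-- lookups of the prefixes of the lowered bare name, longest first (alternative algorithm).

-- MODEL_PAIRS.items() in insertion order (all keys distinct, so the association list is exact)
def MODEL_PAIRS : List (String × String) := [
  ("claude-opus-4", "claude-sonnet-4"),
  ("claude-opus-4.6", "claude-sonnet-4"),
  ("claude-sonnet-4", "claude-haiku-3.5"),
  ("claude-sonnet-4.5", "claude-haiku-3.5"),
  ("claude-sonnet-3.5", "claude-haiku-3.5"),
  ("claude-haiku-3.5", "claude-haiku-3.5"),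
  ("gpt-4o", "gpt-4o-mini"),
  ("gpt-4", "gpt-4o-mini"),
  ("gpt-4-turbo", "gpt-4o-mini"),
  ("gpt-4o-mini", "gpt-4o-mini"),
  ("gpt-5", "gpt-5-mini"),
  ("o3", "gpt-4o-mini"),
  ("o3-mini", "gpt-4o-mini"),
  ("gemini-2.5-pro", "gemini-2.0-flash"),
  ("gemini-2.0-pro", "gemini-2.0-flash"),
  ("gemini-2.0-flash", "gemini-2.0-flash-lite"),
  ("gemini-1.5-pro", "gemini-1.5-flash"),
  ("deepseek-chat", "deepseek-chat"),
  ("deepseek-reasoner", "deepseek-chat"),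
  ("mistral-large", "mistral-small"),
  ("mistral-medium", "mistral-small"),
  ("llama-3.1-70b", "llama-3.1-8b"),
  ("llama-3.1-405b", "llama-3.1-70b"),
  ("qwen-2.5-72b", "qwen-2.5-7b")]

-- ===== PORT A =====
-- A's first loop: exact case-insensitive match with early return
def pvExactLoop (pairs : List (String × String)) (lower : String) : Option String :=
  match pairs with
  | [] => none
  | (key, value) :: rest =>
      if PySem.Str.lower key = lower then some value else pvExactLoop rest lower

-- A's second loop: longest-prefix match accumulating (best_key, best_value)
def pvPrefLoop (pairs : List (String × String)) (lower : String)
    (best_key best_value : String) : String × String :=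
  match pairs with
  | [] => (best_key, best_value)
  | (key, value) :: rest =>
      if PySem.Str.startswith lower (PySem.Str.lower key) = true ∧
         PySem.Str.len best_key < PySem.Str.len key then
        pvPrefLoop rest lower key value
      else
        pvPrefLoop rest lower best_key best_value

def get_sub_agent_model (primary : String) : String :=
  if primary = "" then primary
  else
    -- primary.split("/")[-1]; sep "/" ≠ "" so split? is some, and split of a string is never empty, so the defaults are unreachable
    let bare := (PySem.List.pyGet? ((PySem.Str.split? primary "/").getD []) (-1)).getD ""
    let lower := PySem.Str.lower bare
    match pvExactLoop MODEL_PAIRS lower with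
    | some value => value
    | none => (pvPrefLoop MODEL_PAIRS lower "" bare).2

-- ===== PORT B =====
-- the MODEL_PAIRS dict itself (keys are distinct, so the literal association list is the dict)
def pvTable : PySem.Dict String String := PySem.Dict.mk MODEL_PAIRS

-- _MAX_KEY_LEN = max(len(k) for k in MODEL_PAIRS)
def pvMaxKeyLen : Int := (PySem.List.max? (MODEL_PAIRS.map (fun p => PySem.Str.len p.1)) (fun x => x)).getD 0

-- B's loop 'for i in range(min(len(lower), _MAX_KEY_LEN), 0, -1): value = MODEL_PAIRS.get(lower[:i]); if value is not None: return value':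
-- range(m, 0, -1) visits i = m, …, 1, which is this countdown recursion; lower[:i] with i ≥ 0 is take i (exact)
def pvLookupLoop (lower : String) : Nat → Option String
  | 0 => none
  | i + 1 =>
      match pvTable.get? (String.ofList (lower.toList.take (i + 1))) with
      | some value => some value
      | none => pvLookupLoop lower i

def get_sub_agent_model_alt (primary : String) : String :=
  if primary = "" then primary
  else
    -- primary.split("/")[-1]; sep "/" ≠ "" so split? is some, and split of a string is never empty, so the defaults are unreachable
    let bare := (PySem.List.pyGet? ((PySem.Str.split? primary "/").getD []) (-1)).getD ""
    let lower := PySem.Str.lower bare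
    match pvLookupLoop lower (min lower.toList.length pvMaxKeyLen.toNat) with
    | some value => value
    | none => bare

-- ===== PRECONDITION & SPEC =====
def Spec_get_sub_agent_model (primary : String) (out : String) : Prop := out = get_sub_agent_model_alt primary
instance (primary : String) (out : String) : Decidable (Spec_get_sub_agent_model primary out) := by unfold Spec_get_sub_agent_model; infer_instance

-- ===== CLAIM (what is proved, stated in full; the proofs are below) =====
def Claim_equal_get_sub_agent_model : Prop := ∀ (primary : String), Dom_get_sub_agent_model primary → Spec_get_sub_agent_model primary (get_sub_agent_model primary)

-- ===== LEMMAS AND PROOFS =====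

-- facts about the constant table
lemma model_pairs_lower : ∀ p ∈ MODEL_PAIRS, PySem.Str.lower p.1 = p.1 := by decide
lemma model_pairs_nonempty : ∀ p ∈ MODEL_PAIRS, p.1.toList ≠ [] := by decide
lemma model_pairs_keylen : ∀ p ∈ MODEL_PAIRS, p.1.toList.length ≤ 17 := by decide
lemma maxKeyLen_toNat : pvMaxKeyLen.toNat = 17 := by decide
lemma table_items : pvTable.items = MODEL_PAIRS := rfl
lemma table_keys_nodup : pvTable.keys.Nodup := by decide

-- membership characterization of the dict lookup
lemma table_get?_iff (s v : String) : pvTable.get? s = some v ↔ (s, v) ∈ MODEL_PAIRS := by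
  rw [← table_items]
  exact PySem.Dict.get?_eq_some_iff_mem_items pvTable s v table_keys_nodup

-- the loop condition 'lower.startswith(key.lower())' for a table key is plain list prefix
lemma startswith_table_key (lower k : String) (hk : PySem.Str.lower k = k) :
    PySem.Str.startswith lower (PySem.Str.lower k) = true ↔ k.toList <+: lower.toList := by
  rw [hk]
  simpa using PySem.Chars.startswith_iff lower.toList k.toList

-- A's exact loop: a hit names a pair of the list whose lowered key is `lower`
lemma exactLoop_mem (pairs : List (String × String)) (lower v : String)
    (h : pvExactLoop pairs lower = some v) :
    ∃ p ∈ pairs, PySem.Str.lower p.1 = lower ∧ p.2 = v := by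
  induction pairs with
  | nil => simp [pvExactLoop] at h
  | cons p rest ih =>
      obtain ⟨k, w⟩ := p
      simp only [pvExactLoop] at h
      split_ifs at h with hk
      · exact ⟨(k, w), by simp, hk, Option.some.inj h⟩
      · obtain ⟨q, hq, hql, hqv⟩ := ih h
        exact ⟨q, by simp [hq], hql, hqv⟩

-- characterization of A's longest-prefix fold: the result extends the initial best key,
-- is the initial pair or a matching pair of the list, and its key length dominates every match
lemma prefLoop_char (lower : String) (pairs : List (String × String)) (bk bv : String) :
    bk.toList.length ≤ (pvPrefLoop pairs lower bk bv).1.toList.length ∧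
    (pvPrefLoop pairs lower bk bv = (bk, bv) ∨
      (pvPrefLoop pairs lower bk bv ∈ pairs ∧
       PySem.Str.startswith lower (PySem.Str.lower (pvPrefLoop pairs lower bk bv).1) = true)) ∧
    (∀ p ∈ pairs, PySem.Str.startswith lower (PySem.Str.lower p.1) = true →
       p.1.toList.length ≤ (pvPrefLoop pairs lower bk bv).1.toList.length) := by
  induction pairs generalizing bk bv with
  | nil => simp [pvPrefLoop]
  | cons p rest ih =>
      obtain ⟨k, w⟩ := p
      simp only [pvPrefLoop]
      split_ifs with hc
      · obtain ⟨hsw, hlen⟩ := hc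
        obtain ⟨h1, h2, h3⟩ := ih k w
        have hklen : bk.toList.length < k.toList.length := by
          have := hlen
          simp only [PySem.Str.len_eq] at this
          exact_mod_cast this
        refine ⟨by omega, ?_, ?_⟩
        · rcases h2 with h2 | ⟨hmem, hgood⟩
          · exact Or.inr ⟨by simp [h2], by rw [h2]; exact hsw⟩
          · exact Or.inr ⟨by simp [hmem], hgood⟩
        · intro q hq hgq
          rcases List.mem_cons.mp hq with rfl | hq'
          · exact h1
          · exact h3 q hq' hgq
      · obtain ⟨h1, h2, h3⟩ := ih bk bv
        refine ⟨h1, ?_, ?_⟩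
        · rcases h2 with h2 | ⟨hmem, hgood⟩
          · exact Or.inl h2
          · exact Or.inr ⟨by simp [hmem], hgood⟩
        · intro q hq hgq
          rcases List.mem_cons.mp hq with heq | hq'
          · -- head matched but did not update: its key is not longer than bk
            have hgq' : PySem.Str.startswith lower (PySem.Str.lower k) = true := by
              rw [heq] at hgq; exact hgq
            have hnot : ¬ PySem.Str.len bk < PySem.Str.len k := fun hlt => hc ⟨hgq', hlt⟩
            simp only [PySem.Str.len_eq] at hnot
            rw [heq]
            simp only [String.length_toList] at hnot h1 ⊢
            omega
          · exact h3 q hq' hgq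

-- B's loop returns none when every visited prefix misses the dict
lemma lookupLoop_none (lower : String) (i : Nat)
    (h : ∀ j, 1 ≤ j → j ≤ i → pvTable.get? (String.ofList (lower.toList.take j)) = none) :
    pvLookupLoop lower i = none := by
  induction i with
  | zero => rfl
  | succ i ih =>
      simp only [pvLookupLoop]
      rw [h (i + 1) (by omega) (by omega)]
      exact ih fun j h1 h2 => h j h1 (by omega)

-- B's loop returns the hit at length L when every longer visited prefix misses
lemma lookupLoop_hit (lower : String) (i L : Nat) (v : String)
    (hL1 : 1 ≤ L) (hLi : L ≤ i)
    (hhit : pvTable.get? (String.ofList (lower.toList.take L)) = some v)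
    (habove : ∀ j, L < j → j ≤ i → pvTable.get? (String.ofList (lower.toList.take j)) = none) :
    pvLookupLoop lower i = some v := by
  induction i with
  | zero => omega
  | succ i ih =>
      simp only [pvLookupLoop]
      rcases Nat.lt_or_ge L (i + 1) with hlt | hge
      · rw [habove (i + 1) (by omega) (by omega)]
        exact ih (by omega) fun j h1 h2 => habove j h1 (by omega)
      · have : L = i + 1 := by omega
        rw [← this, hhit]

-- nodup keys make the value of a member pair unique
lemma mem_pairs_value_unique {k a b : String}
    (ha : (k, a) ∈ MODEL_PAIRS) (hb : (k, b) ∈ MODEL_PAIRS) : a = b := by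
  have h1 := (table_get?_iff k a).mpr ha
  have h2 := (table_get?_iff k b).mpr hb
  rw [h1] at h2
  exact Option.some.inj h2

-- a dict hit at prefix length j ≤ n names a matching pair whose key has length j
lemma hit_is_match (lower : String) (j : Nat) (v : String) (hj : j ≤ lower.toList.length)
    (h : pvTable.get? (String.ofList (lower.toList.take j)) = some v) :
    ∃ p ∈ MODEL_PAIRS, p.1.toList <+: lower.toList ∧ p.1.toList.length = j ∧ p.2 = v := by
  have hmem := (table_get?_iff _ _).mp h
  refine ⟨(String.ofList (lower.toList.take j), v), hmem, ?_, ?_, rfl⟩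
  · simpa using List.take_prefix j lower.toList
  · simp only [String.toList_ofList, List.length_take]
    omega

-- the heart of the equivalence: for ANY lower/bare, A's two scans = B's descending lookups
lemma scans_eq_lookups (lower bare : String) :
    (match pvExactLoop MODEL_PAIRS lower with
     | some value => value
     | none => (pvPrefLoop MODEL_PAIRS lower "" bare).2) =
    (match pvLookupLoop lower (min lower.toList.length pvMaxKeyLen.toNat) with
     | some value => value
     | none => bare) := by
  obtain ⟨h1, h2, h3⟩ := prefLoop_char lower MODEL_PAIRS "" bare
  set r := pvPrefLoop MODEL_PAIRS lower "" bare with hr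
  by_cases hmatch : ∃ p ∈ MODEL_PAIRS, p.1.toList <+: lower.toList
  · -- some key is a prefix of lower: A returns r.2, B hits exactly at length r.1
    obtain ⟨q, hq, hqpre⟩ := hmatch
    have hqgood : PySem.Str.startswith lower (PySem.Str.lower q.1) = true :=
      (startswith_table_key lower q.1 (model_pairs_lower q hq)).mpr hqpre
    have hqlen : q.1.toList.length ≤ r.1.toList.length := h3 q hq hqgood
    have hqne : 0 < q.1.toList.length :=
      List.length_pos_of_ne_nil (model_pairs_nonempty q hq)
    -- r cannot be the initial ("", bare) pair
    have hrmem : r ∈ MODEL_PAIRS ∧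
        PySem.Str.startswith lower (PySem.Str.lower r.1) = true := by
      rcases h2 with heq | h2
      · exfalso
        have hr0 : r.1.toList.length = 0 := by rw [heq]; rfl
        omega
      · exact h2
    obtain ⟨hrm, hrgood⟩ := hrmem
    have hrpre : r.1.toList <+: lower.toList :=
      (startswith_table_key lower r.1 (model_pairs_lower r hrm)).mp hrgood
    set L := r.1.toList.length with hL
    have hLn : L ≤ lower.toList.length := hrpre.length_le
    have hL1 : 1 ≤ L := List.length_pos_of_ne_nil (model_pairs_nonempty r hrm)
    have hrtake : r.1.toList = lower.toList.take L := by
      rw [hL]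
      exact (List.prefix_iff_eq_take.mp hrpre)
    -- B hits at L
    have hhit : pvTable.get? (String.ofList (lower.toList.take L)) = some r.2 := by
      rw [(table_get?_iff _ _)]
      have : String.ofList (lower.toList.take L) = r.1 := by
        rw [← hrtake]
        exact String.toList_inj.mp (by simp)
      rw [this]
      exact hrm
    have habove : ∀ j, L < j → j ≤ lower.toList.length →
        pvTable.get? (String.ofList (lower.toList.take j)) = none := by
      intro j hLj hjn
      by_contra hne
      obtain ⟨v, hv⟩ := Option.ne_none_iff_exists'.mp hne
      obtain ⟨p, hp, hppre, hplen, _⟩ := hit_is_match lower j v hjn hv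
      have := h3 p hp ((startswith_table_key lower p.1 (model_pairs_lower p hp)).mpr hppre)
      omega
    have hL17 : L ≤ 17 := model_pairs_keylen r hrm
    have hfuel : L ≤ min lower.toList.length pvMaxKeyLen.toNat := by
      rw [maxKeyLen_toNat]; omega
    rw [lookupLoop_hit lower (min lower.toList.length pvMaxKeyLen.toNat) L r.2 hL1 hfuel hhit
      (fun j hLj hjm => habove j hLj (le_trans hjm (min_le_left _ _)))]
    -- A's side: exact hit (if any) is the pair r itself
    cases hex : pvExactLoop MODEL_PAIRS lower with
    | none => rfl
    | some v =>
        obtain ⟨p, hp, hpl, hpv⟩ := exactLoop_mem MODEL_PAIRS lower v hex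
        have hpk : p.1 = lower := by rw [← model_pairs_lower p hp]; exact hpl
        have hpgood : PySem.Str.startswith lower (PySem.Str.lower p.1) = true :=
          (startswith_table_key lower p.1 (model_pairs_lower p hp)).mpr
            (by rw [hpk])
        have hplen : p.1.toList.length ≤ L := h3 p hp hpgood
        have hplen' : p.1.toList.length = lower.toList.length := by rw [hpk]
        have hLeq : L = lower.toList.length := by omega
        have hkeyeq : r.1 = p.1 := by
          have : r.1.toList = p.1.toList := by
            rw [hrtake, hLeq, hpk]
            simp
          exact String.toList_inj.mp this
        have hp' : (r.1, p.2) ∈ MODEL_PAIRS := by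
          rw [hkeyeq]
          simpa using hp
        have hr' : (r.1, r.2) ∈ MODEL_PAIRS := by simpa using hrm
        have : v = r.2 := by
          rw [← hpv]
          exact mem_pairs_value_unique hp' hr'
        simp [this]
  · -- no key is a prefix: exact loop misses, fold keeps ("", bare), every lookup misses
    simp only [not_exists, not_and] at hmatch
    have hex : pvExactLoop MODEL_PAIRS lower = none := by
      cases hex : pvExactLoop MODEL_PAIRS lower with
      | none => rfl
      | some v =>
          obtain ⟨p, hp, hpl, _⟩ := exactLoop_mem MODEL_PAIRS lower v hex
          have hpk : p.1 = lower := by rw [← model_pairs_lower p hp]; exact hpl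
          exact absurd (by rw [hpk] : p.1.toList <+: lower.toList) (hmatch p hp)
    have hrinit : r = ("", bare) := by
      rcases h2 with heq | ⟨hrm, hrgood⟩
      · exact heq
      · exact absurd
          ((startswith_table_key lower r.1 (model_pairs_lower r hrm)).mp hrgood)
          (hmatch r hrm)
    have hnone : pvLookupLoop lower (min lower.toList.length pvMaxKeyLen.toNat) = none := by
      apply lookupLoop_none
      intro j h1j hjm
      have hjn : j ≤ lower.toList.length := le_trans hjm (min_le_left _ _)
      by_contra hne
      obtain ⟨v, hv⟩ := Option.ne_none_iff_exists'.mp hne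
      obtain ⟨p, hp, hppre, _, _⟩ := hit_is_match lower j v hjn hv
      exact hmatch p hp hppre
    simp only [hex, hnone, hrinit]

-- ===== VERDICT (by name: the statement is the Claim_ definition above) =====
theorem get_sub_agent_model_spec : Claim_equal_get_sub_agent_model := by
  intro primary _
  unfold Spec_get_sub_agent_model
  simp only [get_sub_agent_model, get_sub_agent_model_alt]
  split_ifs with hempty
  · rfl
  · generalize ((PySem.List.pyGet? ((PySem.Str.split? primary "/").getD []) (-1)).getD "") = bare
    exact scans_eq_lookups (PySem.Str.lower bare) bare
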